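-- pv_equiv track=rewrite | github.com/manojxshrestha/ctfr | ctfr.py | clean_subdomains
-- ===== SOURCE A (Python) =====
-- def clean_subdomains(subdomains, target):
--     """Clean and deduplicate subdomains."""
--     cleaned = []
--     seen = set()
--
--     for sub in subdomains:
--         # Skip entries with weird patterns (like ----)
--         if "----" in sub or "--" in sub:
--             continue
--
--         # Skip if contains multiple domains (not ending with target)
--         if not sub.endswith(target):
--             continue
--
--         # Skip wildcards for now (can add back if needed)
--         # if sub.startswith('*.'):
--         #     sub = sub[2:]
--
--         # Clean the subdomain
--         sub = sub.strip()
--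
--         # Skip duplicates
--         if sub and sub not in seen:
--             seen.add(sub)
--             cleaned.append(sub)
--
--     return sorted(cleaned)
-- ===== SOURCE B (Python) =====
-- def clean_subdomains(subdomains, target):
--     """Clean and deduplicate subdomains: filter, sort once, drop adjacent duplicates."""
--     kept = sorted(
--         s
--         for s in (
--             sub.strip()
--             for sub in subdomains
--             if "----" not in sub and "--" not in sub and sub.endswith(target)
--         )
--         if s
--     )
--     result = []
--     for s in kept:
--         if not result or result[-1] != s:
--             result.append(s)
--     return result
-- ===== Notes on version B (the rewrite author's own statement) =====
-- stated objective: alternative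
-- what changed: B drops the seen-set entirely: it filters and strips in one comprehension (keeping duplicates), sorts once, and deduplicates by a single scan that keeps only the first of each run of equal adjacent elements in the sorted list.
import Mathlib
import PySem

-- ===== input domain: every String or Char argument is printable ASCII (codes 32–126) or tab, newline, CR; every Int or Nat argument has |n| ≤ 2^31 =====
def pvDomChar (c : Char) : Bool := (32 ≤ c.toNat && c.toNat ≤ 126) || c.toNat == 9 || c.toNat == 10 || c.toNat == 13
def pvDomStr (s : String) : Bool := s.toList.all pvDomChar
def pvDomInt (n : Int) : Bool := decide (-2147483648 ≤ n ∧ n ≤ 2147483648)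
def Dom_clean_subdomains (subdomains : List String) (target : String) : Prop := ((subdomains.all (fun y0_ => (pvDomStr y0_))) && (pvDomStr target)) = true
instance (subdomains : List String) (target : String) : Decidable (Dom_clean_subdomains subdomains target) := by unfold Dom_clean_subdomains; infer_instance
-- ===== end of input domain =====

-- B's change (one line): no seen-set — filter+strip keeping duplicates, one sort, then drop adjacent duplicates in the sorted list (alternative decomposition, same cost).

-- ===== PORT A =====
-- loop body of A: the two skip-checks on the raw sub, strip, then dedup via the seen set
def pvStepA (target : String) (st : List String × PySem.Set String) (sub : String) : List String × PySem.Set String :=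
  if PySem.Str.isIn "----" sub || PySem.Str.isIn "--" sub then st
  else if !(PySem.Str.endswith sub target) then st
  else
    let s := PySem.Str.strip sub
    if s != "" && !(PySem.Set.contains st.2 s) then (st.1 ++ [s], PySem.Set.add st.2 s) else st

def clean_subdomains (subdomains : List String) (target : String) : List String :=
  let st := subdomains.foldl (pvStepA target) ([], PySem.Set.empty)
  PySem.List.sorted st.1 (fun x => x) false

-- ===== PORT B =====
-- B's generator-expression filter: the same skip conditions, on the raw sub
def pvPassB (target : String) (sub : String) : Bool :=
  !(PySem.Str.isIn "----" sub) && !(PySem.Str.isIn "--" sub) && PySem.Str.endswith sub target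

-- B's dedup loop body: append s unless it equals the last kept element (result[-1])
def pvUniqStep (out : List String) (s : String) : List String :=
  if out.isEmpty || out.getLast? != some s then out ++ [s] else out

def clean_subdomains_alt (subdomains : List String) (target : String) : List String :=
  let kept := PySem.List.sorted
      (((subdomains.filter (pvPassB target)).map PySem.Str.strip).filter (fun s => s != ""))
      (fun x => x) false
  kept.foldl pvUniqStep []

-- ===== PRECONDITION & SPEC =====
def Spec_clean_subdomains (subdomains : List String) (target : String) (out : List String) : Prop := out = clean_subdomains_alt subdomains target
instance (subdomains : List String) (target : String) (out : List String) : Decidable (Spec_clean_subdomains subdomains target out) := by unfold Spec_clean_subdomains; infer_instance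

-- ===== CLAIM (what is proved, stated in full; the proofs are below) =====
def Claim_equal_clean_subdomains : Prop := ∀ (subdomains : List String) (target : String), Dom_clean_subdomains subdomains target → Spec_clean_subdomains subdomains target (clean_subdomains subdomains target)

-- ===== LEMMAS AND PROOFS =====

-- the multiset B sorts: filtered, stripped, nonempty (duplicates kept)
def pvKept (subdomains : List String) (target : String) : List String :=
  ((subdomains.filter (pvPassB target)).map PySem.Str.strip).filter (fun s => s != "")

-- A's loop, run from any state (seen, seen), is the set-insert fold over pvKept
lemma pvFoldA_eq (target : String) : ∀ (subs : List String) (seen : PySem.Set String),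
    subs.foldl (pvStepA target) (seen, seen)
      = ((pvKept subs target).foldl PySem.Set.add seen, (pvKept subs target).foldl PySem.Set.add seen) := by
  intro subs
  induction subs with
  | nil => intro seen; simp [pvKept]
  | cons sub rest ih =>
    intro seen
    by_cases hA : PySem.Chars.isIn ['-', '-', '-', '-'] sub.toList = true
    · have hp : pvPassB target sub = false := by simp [pvPassB, hA]
      simp [pvStepA, hA, pvKept, hp]
      simpa [pvKept] using ih seen
    · replace hA : PySem.Chars.isIn ['-', '-', '-', '-'] sub.toList = false := by
        simpa using hA
      by_cases hB : PySem.Chars.isIn ['-', '-'] sub.toList = true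
      · have hp : pvPassB target sub = false := by simp [pvPassB, hB]
        simp [pvStepA, hA, hB, pvKept, hp]
        simpa [pvKept] using ih seen
      · replace hB : PySem.Chars.isIn ['-', '-'] sub.toList = false := by simpa using hB
        by_cases hE : PySem.Chars.endswith sub.toList target.toList = true
        · have hp : pvPassB target sub = true := by simp [pvPassB, hA, hB, hE]
          by_cases h3 : PySem.Str.strip sub = ""
          · simp [pvStepA, hA, hB, hE, pvKept, hp, h3]
            simpa [pvKept] using ih seen
          · have hk : pvKept (sub :: rest) target
                = PySem.Str.strip sub :: pvKept rest target := by
              simp [pvKept, hp, h3]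
            rw [hk]
            by_cases h4 : PySem.Str.strip sub ∈ seen
            · have hadd : PySem.Set.add seen (PySem.Str.strip sub) = seen :=
                PySem.Set.add_of_mem h4
              simp only [List.foldl_cons, hadd]
              simp [pvStepA, hA, hB, hE, h4]
              simpa using ih seen
            · have hadd : PySem.Set.add seen (PySem.Str.strip sub) = seen ++ [PySem.Str.strip sub] :=
                PySem.Set.add_of_not_mem h4
              simp only [List.foldl_cons, hadd]
              have hstep : pvStepA target (seen, seen) sub
                  = (seen ++ [PySem.Str.strip sub], seen ++ [PySem.Str.strip sub]) := by
                simp [pvStepA, hA, hB, hE, h3, h4]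
              rw [hstep]
              exact ih (seen ++ [PySem.Str.strip sub])
        · have hp : pvPassB target sub = false := by simp [pvPassB, hE]
          simp [pvStepA, hA, hB, hE, pvKept, hp]
          simpa [pvKept] using ih seen

-- in a Pairwise-(<) list every member is ≤ the last element
lemma pvMem_le_getLast : ∀ (acc : List String) (h : acc ≠ []) (a : String),
    acc.Pairwise (· < ·) → a ∈ acc → a ≤ acc.getLast h := by
  intro acc
  induction acc with
  | nil => intro h; exact absurd rfl h
  | cons x xs ih =>
    intro h a hpw hmem
    rcases List.pairwise_cons.mp hpw with ⟨hx, hxs⟩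
    rcases List.mem_cons.mp hmem with rfl | hm
    · cases xs with
      | nil => simp [List.getLast]
      | cons y ys =>
        rw [List.getLast_cons (by simp)]
        exact le_of_lt (hx _ (List.getLast_mem (by simp)))
    · cases xs with
      | nil => simp at hm
      | cons y ys =>
        rw [List.getLast_cons (by simp)]
        exact ih (by simp) a hxs hm

-- invariant of B's dedup scan over a ≤-sorted list
lemma pvUniq_spec : ∀ (l acc : List String), l.Pairwise (· ≤ ·) → acc.Pairwise (· < ·) →
    (∀ a ∈ acc, ∀ b ∈ l, a ≤ b) →
    (l.foldl pvUniqStep acc).Pairwise (· < ·) ∧ (∀ x, x ∈ l.foldl pvUniqStep acc ↔ x ∈ acc ∨ x ∈ l) := by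
  intro l
  induction l with
  | nil => intro acc _ hacc _; exact ⟨hacc, by simp⟩
  | cons s t ih =>
    intro acc hl hacc hle
    rcases List.pairwise_cons.mp hl with ⟨hs, ht⟩
    by_cases hc : acc.getLast? = some s
    · have hne : acc ≠ [] := by intro h; rw [h] at hc; simp at hc
      have hsmem : s ∈ acc := by
        have h := List.getLast?_eq_some_getLast hne
        have hs' : acc.getLast hne = s := Option.some_inj.mp (h.symm.trans hc)
        exact hs' ▸ List.getLast_mem hne
      have hstep : pvUniqStep acc s = acc := by
        simp [pvUniqStep, hc, List.isEmpty_eq_false_iff.mpr hne]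
      rw [List.foldl_cons, hstep]
      obtain ⟨h1, h2⟩ := ih acc ht hacc (fun a ha b hb => hle a ha b (List.mem_cons_of_mem _ hb))
      refine ⟨h1, fun x => ?_⟩
      rw [h2]
      constructor
      · rintro (h | h) <;> simp [h]
      · rintro (h | h)
        · exact Or.inl h
        · rcases List.mem_cons.mp h with rfl | h
          · exact Or.inl hsmem
          · exact Or.inr h
    · have hstep : pvUniqStep acc s = acc ++ [s] := by
        simp [pvUniqStep, hc]
      have hcross : ∀ a ∈ acc, a < s := by
        intro a ha
        have hle' : a ≤ s := hle a ha s (List.mem_cons_self)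
        rcases lt_or_eq_of_le hle' with h | rfl
        · exact h
        · exfalso
          have hne : acc ≠ [] := by intro h; rw [h] at ha; simp at ha
          have h1 : a ≤ acc.getLast hne := pvMem_le_getLast acc hne a hacc ha
          have h2 : acc.getLast hne ≤ a := hle _ (List.getLast_mem hne) a (List.mem_cons_self)
          have : acc.getLast? = some a := by
            rw [List.getLast?_eq_some_getLast hne]; exact congrArg some (le_antisymm h2 h1)
          exact hc this
      have hacc' : (acc ++ [s]).Pairwise (· < ·) := by
        rw [List.pairwise_append]
        exact ⟨hacc, by simp, by simpa using hcross⟩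
      have hle' : ∀ a ∈ acc ++ [s], ∀ b ∈ t, a ≤ b := by
        intro a ha b hb
        rcases List.mem_append.mp ha with h | h
        · exact hle a h b (List.mem_cons_of_mem _ hb)
        · simp at h; subst h; exact hs b hb
      rw [List.foldl_cons, hstep]
      obtain ⟨h1, h2⟩ := ih (acc ++ [s]) ht hacc' hle'
      refine ⟨h1, fun x => ?_⟩
      rw [h2]
      simp [or_assoc]

-- ===== VERDICT (by name: the statement is the Claim_ definition above) =====
theorem clean_subdomains_spec : Claim_equal_clean_subdomains := by
  unfold Claim_equal_clean_subdomains
  intro subs target _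
  unfold Spec_clean_subdomains clean_subdomains clean_subdomains_alt
  have hfold := pvFoldA_eq target subs PySem.Set.empty
  have hinit : (([], PySem.Set.empty) : List String × PySem.Set String)
      = (PySem.Set.empty, PySem.Set.empty) := rfl
  rw [hinit, hfold]
  have hof : (pvKept subs target).foldl PySem.Set.add PySem.Set.empty
      = PySem.Set.ofList (pvKept subs target) := (PySem.Set.ofList_eq_foldl _).symm
  simp only [hof]
  -- B's scan over the sorted kept list: strictly increasing, same members
  have hLpw : (PySem.List.sorted (pvKept subs target) (fun x => x) false).Pairwise (· ≤ ·) := by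
    simpa using PySem.List.sorted_pairwise (pvKept subs target) (fun x => x)
  obtain ⟨hBpw, hBmem⟩ := pvUniq_spec
    (PySem.List.sorted (pvKept subs target) (fun x => x) false) [] hLpw (by simp) (by simp)
  have hnodupB : ((PySem.List.sorted (pvKept subs target) (fun x => x) false).foldl pvUniqStep []).Nodup :=
    hBpw.imp (fun h => ne_of_lt h)
  have hperm : ((PySem.List.sorted (pvKept subs target) (fun x => x) false).foldl pvUniqStep []).Perm
      (PySem.Set.ofList (pvKept subs target)) := by
    rw [List.perm_ext_iff_of_nodup hnodupB (PySem.Set.nodup_ofList _)]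
    intro a
    rw [hBmem a, PySem.Set.mem_ofList, PySem.List.mem_sorted]
    simp
  have := PySem.List.sorted_eq_of_perm_of_pairwise_lt _ _ (fun x => x) hperm (by simpa using hBpw)
  simpa [pvKept] using this
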